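-- pv_equiv track=rewrite | github.com/Yashika-code/biasGuard | functions/helpers/proxy_detection.py | decode_roll_number
-- ===== SOURCE A (Python) =====
-- from typing import Dict, List, Any, Optional
--
-- BIHAR_ROLL_PREFIX_MAP = {
--     "1": "Patna (Urban)", "2": "Nalanda", "3": "Bhojpur",
--     "4": "Rohtas", "5": "Kaimur", "6": "Gaya",
--     "7": "Jehanabad", "8": "Aurangabad", "9": "Nawada",
--     "10": "Arwal", "11": "Saran", "12": "Siwan",
--     "13": "Gopalganj", "14": "West Champaran", "15": "East Champaran",
--     "16": "Muzaffarpur", "17": "Sitamarhi", "18": "Sheohar",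
--     "19": "Vaishali", "20": "Samastipur", "21": "Darbhanga",
--     "22": "Madhubani", "23": "Supaul", "24": "Saharsa",
--     "25": "Madhepura", "26": "Bhagalpur", "27": "Banka",
--     "28": "Munger", "29": "Lakhisarai", "30": "Sheikhpura",
--     "31": "Begusarai", "32": "Khagaria", "33": "Purnea",
--     "34": "Katihar", "35": "Araria", "36": "Kishanganj",
--     "37": "Sehara",
-- }
--
-- URBAN_DISTRICT_CODES = {"1"}  # Patna
--
-- def decode_roll_number(roll: str) -> Dict[str, str]:
--     """Attempt to decode Bihar-format roll number to district and rural/urban tag."""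
--     roll = str(roll).strip()
--     for prefix in sorted(BIHAR_ROLL_PREFIX_MAP.keys(), key=len, reverse=True):
--         if roll.startswith(prefix):
--             district = BIHAR_ROLL_PREFIX_MAP[prefix]
--             rural_tag = "Urban" if prefix in URBAN_DISTRICT_CODES else "Rural"
--             return {"district": district, "rural_urban": rural_tag, "prefix": prefix}
--     return {}
-- ===== SOURCE B (Python) =====
-- DISTRICTS = [
--     "Patna (Urban)", "Nalanda", "Bhojpur", "Rohtas", "Kaimur", "Gaya",
--     "Jehanabad", "Aurangabad", "Nawada", "Arwal", "Saran", "Siwan",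
--     "Gopalganj", "West Champaran", "East Champaran", "Muzaffarpur",
--     "Sitamarhi", "Sheohar", "Vaishali", "Samastipur", "Darbhanga",
--     "Madhubani", "Supaul", "Saharsa", "Madhepura", "Bhagalpur", "Banka",
--     "Munger", "Lakhisarai", "Sheikhpura", "Begusarai", "Khagaria",
--     "Purnea", "Katihar", "Araria", "Kishanganj", "Sehara",
-- ]
--
--
-- def _entry(prefix, n):
--     return {"district": DISTRICTS[n - 1],
--             "rural_urban": "Urban" if n == 1 else "Rural",
--             "prefix": prefix}
--
--
-- def decode_roll_number(roll):
--     """Arithmetic decoding: read the leading one/two digits as a district number 1..37."""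
--     roll = str(roll).strip()
--     digits = "0123456789"
--     if len(roll) >= 2 and roll[0] in digits and roll[1] in digits:
--         n = 10 * digits.index(roll[0]) + digits.index(roll[1])
--         if 10 <= n <= 37:
--             return _entry(roll[:2], n)
--     if len(roll) >= 1 and roll[0] in "123456789":
--         return _entry(roll[:1], digits.index(roll[0]))
--     return {}
-- ===== Notes on version B (the rewrite author's own statement) =====
-- stated objective: alternative
-- what changed: Replaces A's sort-all-keys-by-length-then-startswith-scan over the dict by arithmetic decoding: read the leading one or two digit characters as a district number 1..37 and index a plain list of district names; no prefix map is consulted at all.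
import Mathlib
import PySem

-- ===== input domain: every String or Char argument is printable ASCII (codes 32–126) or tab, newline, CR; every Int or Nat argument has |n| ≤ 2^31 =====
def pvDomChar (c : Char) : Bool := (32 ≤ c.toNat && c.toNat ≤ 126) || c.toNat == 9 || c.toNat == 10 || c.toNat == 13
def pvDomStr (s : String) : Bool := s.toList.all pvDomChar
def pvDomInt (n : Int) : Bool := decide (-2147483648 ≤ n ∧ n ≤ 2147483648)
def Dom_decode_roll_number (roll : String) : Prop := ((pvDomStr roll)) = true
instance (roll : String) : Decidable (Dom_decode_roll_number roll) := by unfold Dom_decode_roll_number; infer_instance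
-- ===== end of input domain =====

-- B replaces A's sort-keys-by-length-and-startswith-scan over the prefix dict by arithmetic
-- decoding (read the leading one/two digits as a number 1..37 and index a list of names);
-- objective: a genuinely different algorithm of similar cost.
-- Strings are handled on the List Char side (PySem.Chars); A's module dict is keyed by char lists.

-- ===== PORT A =====
-- module constant BIHAR_ROLL_PREFIX_MAP (keys as char lists, per the Chars convention)
def pvMap : PySem.Dict (List Char) String := PySem.Dict.ofList [
  (['1'], "Patna (Urban)"),
  (['2'], "Nalanda"),
  (['3'], "Bhojpur"),
  (['4'], "Rohtas"),
  (['5'], "Kaimur"),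
  (['6'], "Gaya"),
  (['7'], "Jehanabad"),
  (['8'], "Aurangabad"),
  (['9'], "Nawada"),
  (['1', '0'], "Arwal"),
  (['1', '1'], "Saran"),
  (['1', '2'], "Siwan"),
  (['1', '3'], "Gopalganj"),
  (['1', '4'], "West Champaran"),
  (['1', '5'], "East Champaran"),
  (['1', '6'], "Muzaffarpur"),
  (['1', '7'], "Sitamarhi"),
  (['1', '8'], "Sheohar"),
  (['1', '9'], "Vaishali"),
  (['2', '0'], "Samastipur"),
  (['2', '1'], "Darbhanga"),
  (['2', '2'], "Madhubani"),
  (['2', '3'], "Supaul"),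
  (['2', '4'], "Saharsa"),
  (['2', '5'], "Madhepura"),
  (['2', '6'], "Bhagalpur"),
  (['2', '7'], "Banka"),
  (['2', '8'], "Munger"),
  (['2', '9'], "Lakhisarai"),
  (['3', '0'], "Sheikhpura"),
  (['3', '1'], "Begusarai"),
  (['3', '2'], "Khagaria"),
  (['3', '3'], "Purnea"),
  (['3', '4'], "Katihar"),
  (['3', '5'], "Araria"),
  (['3', '6'], "Kishanganj"),
  (['3', '7'], "Sehara")
]

-- module constant URBAN_DISTRICT_CODES (a set with one element)
def pvUrban : PySem.Set (List Char) := PySem.Set.ofList [['1']]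

-- the for-loop with early return: the first prefix (in the sorted order) that roll starts with wins
def pvScanA : List (List Char) → List Char → List (String × String)
  | [], _ => []
  | p :: ps, r =>
    if PySem.Chars.startswith r p then
      [("district", pvMap.getD p ""),   -- BIHAR_ROLL_PREFIX_MAP[prefix]: p is always a key here
       ("rural_urban", if p ∈ pvUrban then "Urban" else "Rural"),
       ("prefix", String.ofList p)]
    else pvScanA ps r

def decode_roll_number (roll : String) : List (String × String) :=
  let r := PySem.Chars.strip roll.toList          -- str(roll).strip()
  pvScanA (PySem.List.sorted pvMap.keys (fun k => k.length) true) r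

-- ===== PORT B =====
-- module constant DISTRICTS: the 37 district names in numeric order
def pvDistricts : List String := [
  "Patna (Urban)", "Nalanda", "Bhojpur", "Rohtas", "Kaimur", "Gaya",
  "Jehanabad", "Aurangabad", "Nawada", "Arwal", "Saran", "Siwan",
  "Gopalganj", "West Champaran", "East Champaran", "Muzaffarpur",
  "Sitamarhi", "Sheohar", "Vaishali", "Samastipur", "Darbhanga",
  "Madhubani", "Supaul", "Saharsa", "Madhepura", "Bhagalpur", "Banka",
  "Munger", "Lakhisarai", "Sheikhpura", "Begusarai", "Khagaria",
  "Purnea", "Katihar", "Araria", "Kishanganj", "Sehara"]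

-- "0123456789" / "123456789" as char lists
def pvDigits : List Char := ['0', '1', '2', '3', '4', '5', '6', '7', '8', '9']
def pvNonzero : List Char := ['1', '2', '3', '4', '5', '6', '7', '8', '9']

-- helper _entry(prefix, n): builds the returned dict from the district number
def pvEntry (p : List Char) (n : Nat) : List (String × String) :=
  [("district", pvDistricts.getD (n - 1) ""),   -- DISTRICTS[n-1]: n is always 1..37 here
   ("rural_urban", if n == 1 then "Urban" else "Rural"),
   ("prefix", String.ofList p)]

-- the second `if` of Source B (one leading nonzero digit) and the final `return {}`
def pvOneDigit : List Char → List (String × String)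
  | a :: _ => if pvNonzero.contains a then pvEntry [a] (pvDigits.idxOf a) else []
  | [] => []

-- the main body of Source B on the stripped string: the first `if` (two leading digits), else pvOneDigit
def pvDecodeB : List Char → List (String × String)
  | a :: b :: rest =>                              -- len(roll) >= 2
    if pvDigits.contains a && pvDigits.contains b then
      let n := 10 * pvDigits.idxOf a + pvDigits.idxOf b
      if 10 ≤ n && n ≤ 37 then pvEntry [a, b] n
      else pvOneDigit (a :: b :: rest)
    else pvOneDigit (a :: b :: rest)
  | r => pvOneDigit r

def decode_roll_number_alt (roll : String) : List (String × String) :=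
  pvDecodeB (PySem.Chars.strip roll.toList)        -- str(roll).strip()

-- ===== PRECONDITION & SPEC =====
def Spec_decode_roll_number (roll : String) (out : List (String × String)) : Prop := out = decode_roll_number_alt roll
instance (roll : String) (out : List (String × String)) : Decidable (Spec_decode_roll_number roll out) := by unfold Spec_decode_roll_number; infer_instance

-- ===== CLAIM (what is proved, stated in full; the proofs are below) =====
def Claim_equal_decode_roll_number : Prop := ∀ (roll : String), Dom_decode_roll_number roll → Spec_decode_roll_number roll (decode_roll_number roll)

-- ===== LEMMAS AND PROOFS =====

-- output of A's loop body for a matched prefix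
def pvOutA (p : List Char) : List (String × String) :=
  [("district", pvMap.getD p ""),
   ("rural_urban", if p ∈ pvUrban then "Urban" else "Rural"),
   ("prefix", String.ofList p)]

-- the two halves of sorted(BIHAR_ROLL_PREFIX_MAP.keys(), key=len, reverse=True): 2-char keys first, then 1-char keys
def pvK2 : List (List Char) := [['1', '0'], ['1', '1'], ['1', '2'], ['1', '3'], ['1', '4'], ['1', '5'], ['1', '6'], ['1', '7'], ['1', '8'], ['1', '9'], ['2', '0'], ['2', '1'], ['2', '2'], ['2', '3'], ['2', '4'], ['2', '5'], ['2', '6'], ['2', '7'], ['2', '8'], ['2', '9'], ['3', '0'], ['3', '1'], ['3', '2'], ['3', '3'], ['3', '4'], ['3', '5'], ['3', '6'], ['3', '7']]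
def pvK1 : List (List Char) := [['1'], ['2'], ['3'], ['4'], ['5'], ['6'], ['7'], ['8'], ['9']]

set_option maxRecDepth 16384 in
theorem pv_sorted_keys : PySem.List.sorted pvMap.keys (fun k => k.length) true = pvK2 ++ pvK1 := rfl

theorem pv_len2 : ∀ k ∈ pvK2, k.length = 2 := by decide
theorem pv_len1 : ∀ k ∈ pvK1, k.length = 1 := by decide

theorem pv_scan_nil (cs : List Char) : pvScanA [] cs = [] := rfl

theorem pv_scan_cons (k : List Char) (ks : List (List Char)) (cs : List Char) :
    pvScanA (k :: ks) cs = if PySem.Chars.startswith cs k then pvOutA k else pvScanA ks cs := rfl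

-- roll.startswith(p) for a 2-char p looks only at the first two chars
theorem pv_startswith2 (a b : Char) (r : List Char) (k : List Char) (h : k.length = 2) :
    PySem.Chars.startswith (a :: b :: r) k = (k == [a, b]) := by
  match k, h with
  | [k1, k2], _ => simp [PySem.Chars.startswith, List.isPrefixOf]

-- a 2-char p is never a prefix of a 1-char string
theorem pv_startswith2_short (a : Char) (k : List Char) (h : k.length = 2) :
    PySem.Chars.startswith [a] k = false := by
  match k, h with
  | [k1, k2], _ => simp [PySem.Chars.startswith, List.isPrefixOf]

-- roll.startswith(p) for a 1-char p looks only at the first char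
theorem pv_startswith1 (a : Char) (r : List Char) (k : List Char) (h : k.length = 1) :
    PySem.Chars.startswith (a :: r) k = (k == [a]) := by
  match k, h with
  | [k1], _ => simp [PySem.Chars.startswith, List.isPrefixOf]

-- the loop skips every prefix that fails the startswith test
theorem pv_scan_skip (ks ks' : List (List Char)) (cs : List Char)
    (h : ∀ k ∈ ks, PySem.Chars.startswith cs k = false) :
    pvScanA (ks ++ ks') cs = pvScanA ks' cs := by
  induction ks with
  | nil => rfl
  | cons k ks ih =>
    rw [List.cons_append, pv_scan_cons, h k List.mem_cons_self, if_neg (by simp)]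
    exact ih (fun k hk => h k (List.mem_cons_of_mem _ hk))

-- if every tested prefix behaves like an equality test against x and x occurs, the loop returns x's entry
theorem pv_scan_hit (ks ks' : List (List Char)) (x cs : List Char)
    (h : ∀ k ∈ ks, PySem.Chars.startswith cs k = (k == x)) (hx : x ∈ ks) :
    pvScanA (ks ++ ks') cs = pvOutA x := by
  induction ks with
  | nil => cases hx
  | cons k ks ih =>
    by_cases hk : k = x
    · subst hk
      rw [List.cons_append, pv_scan_cons, h k List.mem_cons_self, if_pos (by simp)]
    · rw [List.cons_append, pv_scan_cons, h k List.mem_cons_self,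
        if_neg (by simp [hk])]
      exact ih (fun k hk => h k (List.mem_cons_of_mem _ hk))
        (by rcases List.mem_cons.mp hx with h' | h' <;> [exact absurd h'.symm hk; exact h'])

-- A's scan on cs = a :: b :: r reduces to the two membership tests
theorem pv_scanA_two (a b : Char) (r : List Char) :
    pvScanA (pvK2 ++ pvK1) (a :: b :: r) =
      (if [a, b] ∈ pvK2 then pvOutA [a, b]
       else if [a] ∈ pvK1 then pvOutA [a] else []) := by
  by_cases h2 : [a, b] ∈ pvK2
  · rw [pv_scan_hit pvK2 pvK1 [a, b] (a :: b :: r)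
      (fun k hk => pv_startswith2 a b r k (pv_len2 k hk)) h2, if_pos h2]
  · rw [pv_scan_skip pvK2 pvK1 (a :: b :: r)
      (fun k hk => by
        rw [pv_startswith2 a b r k (pv_len2 k hk)]
        exact beq_eq_false_iff_ne.mpr (fun h => h2 (h ▸ hk))),
      if_neg h2]
    by_cases h1 : [a] ∈ pvK1
    · rw [if_pos h1, ← List.append_nil pvK1,
        pv_scan_hit pvK1 [] [a] (a :: b :: r)
          (fun k hk => pv_startswith1 a (b :: r) k (pv_len1 k hk)) h1]
    · rw [if_neg h1, ← List.append_nil pvK1,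
        pv_scan_skip pvK1 [] (a :: b :: r)
          (fun k hk => by
            rw [pv_startswith1 a (b :: r) k (pv_len1 k hk)]
            exact beq_eq_false_iff_ne.mpr (fun h => h1 (h ▸ hk))),
        pv_scan_nil]

-- A's scan on a 1-char string reduces to one membership test
theorem pv_scanA_one (a : Char) :
    pvScanA (pvK2 ++ pvK1) [a] =
      (if [a] ∈ pvK1 then pvOutA [a] else []) := by
  rw [pv_scan_skip pvK2 pvK1 [a] (fun k hk => pv_startswith2_short a k (pv_len2 k hk))]
  by_cases h1 : [a] ∈ pvK1
  · rw [if_pos h1, ← List.append_nil pvK1,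
      pv_scan_hit pvK1 [] [a] [a] (fun k hk => pv_startswith1 a [] k (pv_len1 k hk)) h1]
  · rw [if_neg h1, ← List.append_nil pvK1,
      pv_scan_skip pvK1 [] [a]
        (fun k hk => by
          rw [pv_startswith1 a [] k (pv_len1 k hk)]
          exact beq_eq_false_iff_ne.mpr (fun h => h1 (h ▸ hk))),
      pv_scan_nil]

-- bridge: the one-char condition and output agree
theorem pv_one_iff (a : Char) : pvNonzero.contains a = true ↔ [a] ∈ pvK1 := by
  constructor
  · intro h
    have h' : a ∈ pvNonzero := by simpa using h
    fin_cases h' <;> decide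
  · intro h
    fin_cases h <;> decide

set_option maxRecDepth 16384 in
theorem pv_one_out (a : Char) (h : [a] ∈ pvK1) :
    pvOutA [a] = pvEntry [a] (pvDigits.idxOf a) := by
  fin_cases h <;> decide

-- bridge: the two-char condition and output agree
theorem pv_two_iff (a b : Char) :
    ((pvDigits.contains a && pvDigits.contains b) = true ∧
      (10 ≤ 10 * pvDigits.idxOf a + pvDigits.idxOf b ∧
        10 * pvDigits.idxOf a + pvDigits.idxOf b ≤ 37)) ↔ [a, b] ∈ pvK2 := by
  constructor
  · rintro ⟨hab, hlo, hhi⟩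
    simp only [Bool.and_eq_true] at hab
    have ha : a ∈ pvDigits := by simpa using hab.1
    have hb : b ∈ pvDigits := by simpa using hab.2
    fin_cases ha <;> fin_cases hb <;> revert hlo hhi <;> decide
  · intro h
    fin_cases h <;> refine ⟨by decide, by decide, by decide⟩

set_option maxRecDepth 16384 in
theorem pv_two_out (a b : Char) (h : [a, b] ∈ pvK2) :
    pvOutA [a, b] = pvEntry [a, b] (10 * pvDigits.idxOf a + pvDigits.idxOf b) := by
  fin_cases h <;> decide

-- the two ports agree on every stripped char list
theorem pv_core (cs : List Char) :
    pvScanA (PySem.List.sorted pvMap.keys (fun k => k.length) true) cs = pvDecodeB cs := by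
  rw [pv_sorted_keys]
  match cs with
  | [] => rfl
  | [a] =>
    rw [pv_scanA_one a]
    simp only [pvDecodeB, pvOneDigit]
    by_cases h1 : [a] ∈ pvK1
    · rw [if_pos h1, if_pos ((pv_one_iff a).mpr h1), pv_one_out a h1]
    · rw [if_neg h1, if_neg (by
        intro hc
        exact h1 ((pv_one_iff a).mp hc))]
  | a :: b :: r =>
    rw [pv_scanA_two a b r]
    simp only [pvDecodeB]
    by_cases h2 : [a, b] ∈ pvK2
    · obtain ⟨hab, hlo, hhi⟩ := (pv_two_iff a b).mpr h2
      rw [if_pos h2, if_pos hab, if_pos (by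
        simp only [Bool.and_eq_true, decide_eq_true_eq]
        exact ⟨hlo, hhi⟩), pv_two_out a b h2]
    · have hno : ¬ ((pvDigits.contains a && pvDigits.contains b) = true ∧
          (10 ≤ 10 * pvDigits.idxOf a + pvDigits.idxOf b ∧
            10 * pvDigits.idxOf a + pvDigits.idxOf b ≤ 37)) :=
        fun hc => h2 ((pv_two_iff a b).mp hc)
      rw [if_neg h2]
      have hone : pvOneDigit (a :: b :: r) =
          (if [a] ∈ pvK1 then pvOutA [a] else []) := by
        simp only [pvOneDigit]
        by_cases h1 : [a] ∈ pvK1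
        · rw [if_pos h1, if_pos ((pv_one_iff a).mpr h1), pv_one_out a h1]
        · rw [if_neg h1, if_neg (by
            intro hc
            exact h1 ((pv_one_iff a).mp hc))]
      rw [← hone]
      by_cases hab : (pvDigits.contains a && pvDigits.contains b) = true
      · have hn : ¬ ((10 ≤ 10 * pvDigits.idxOf a + pvDigits.idxOf b ∧
            10 * pvDigits.idxOf a + pvDigits.idxOf b ≤ 37)) :=
          fun hr => hno ⟨hab, hr⟩
        rw [if_pos hab, if_neg (by
          simp only [Bool.and_eq_true, decide_eq_true_eq]
          exact fun hc => hn hc)]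
      · rw [if_neg hab]

-- ===== VERDICT (by name: the statement is the Claim_ definition above) =====
theorem decode_roll_number_spec : Claim_equal_decode_roll_number := by
  intro roll _
  unfold Spec_decode_roll_number decode_roll_number decode_roll_number_alt
  exact pv_core _
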